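-- pv_equiv track=rewrite | github.com/NKcell/LeetCode | 922. Sort Array By Parity II/922.py | sortArrayByParityII1
-- ===== SOURCE A (Python) =====
-- def sortArrayByParityII1(a):
--     i = 0 # pointer for even misplaced
--     j = 1 # pointer for odd misplaced
--     sz = len(a)
--
--     # invariant: for every misplaced odd there is misplaced even
--     # since there is just enough space for odds and evens
--
--     while i < sz and j < sz:
--         if a[i] % 2 == 0:
--             i += 2
--         elif a[j] % 2 == 1:
--             j += 2
--         else:
--             # a[i] % 2 == 1 AND a[j] % 2 == 0
--             a[i],a[j] = a[j],a[i]
--             i += 2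
--             j += 2
--
--     return a
-- ===== SOURCE B (Python) =====
-- def sortArrayByParityII1(a):
--     # Simpler decomposition: collect the misplaced positions first, then swap
--     # them pairwise (mutates a in place and returns it, like the original).
--     wrong_even = [i for i in range(0, len(a), 2) if a[i] % 2 == 1]
--     wrong_odd = [j for j in range(1, len(a), 2) if a[j] % 2 == 0]
--     for i, j in zip(wrong_even, wrong_odd):
--         a[i], a[j] = a[j], a[i]
--     return a
-- ===== Notes on version B (the rewrite author's own statement) =====
-- stated objective: simpler
-- what changed: Replaces the interleaved two-pointer while loop with two comprehension passes that collect the misplaced even and odd positions up front, then a single zip loop that swaps them pairwise.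
import Mathlib
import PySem

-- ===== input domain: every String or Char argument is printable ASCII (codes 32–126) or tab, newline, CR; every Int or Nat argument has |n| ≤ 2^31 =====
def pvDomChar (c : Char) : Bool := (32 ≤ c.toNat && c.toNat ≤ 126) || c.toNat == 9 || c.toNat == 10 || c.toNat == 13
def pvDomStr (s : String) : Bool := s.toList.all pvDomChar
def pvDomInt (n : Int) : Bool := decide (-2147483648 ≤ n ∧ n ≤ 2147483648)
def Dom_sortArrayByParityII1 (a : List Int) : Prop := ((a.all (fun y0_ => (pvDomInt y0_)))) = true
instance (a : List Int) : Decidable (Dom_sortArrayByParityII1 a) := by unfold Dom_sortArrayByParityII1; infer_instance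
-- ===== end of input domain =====

-- B collects the misplaced even/odd positions in two passes and swaps them pairwise,
-- replacing A's interleaved two-pointer scan (simpler decomposition, same cost).
-- Both Pythons mutate `a` in place and return it; the equivalence proved is about the
-- returned value.


-- ===== PORT A =====
-- A's while loop; the pointers i, j start at 0, 1 and only grow, so they are Nats.
-- a[i] with i < len(a) is List.getD (in range, so exact); Lean's `%` on Int with the
-- positive divisor 2 agrees with Python's `%`.
def pvLoopA (a : List Int) (i j : Nat) : List Int :=
  if h : i < a.length ∧ j < a.length then
    if a.getD i 0 % 2 == 0 then
      pvLoopA a (i + 2) j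
    else if a.getD j 0 % 2 == 1 then
      pvLoopA a i (j + 2)
    else
      -- a[i], a[j] = a[j], a[i]
      pvLoopA ((a.set i (a.getD j 0)).set j (a.getD i 0)) (i + 2) (j + 2)
  else a
termination_by (a.length - i) + (a.length - j)
decreasing_by
  · omega
  · omega
  · simp only [List.length_set]; omega

def sortArrayByParityII1 (a : List Int) : List Int := pvLoopA a 0 1

-- ===== PORT B =====
def sortArrayByParityII1_alt (a : List Int) : List Int :=
  let wrongEven := (PySem.List.pyRange 0 (PySem.List.len a) 2).filter
    (fun i => PySem.List.pyGetD a i 0 % 2 == 1)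
  let wrongOdd := (PySem.List.pyRange 1 (PySem.List.len a) 2).filter
    (fun j => PySem.List.pyGetD a j 0 % 2 == 0)
  (wrongEven.zip wrongOdd).foldl
    (fun acc p =>
      -- a[i], a[j] = a[j], a[i]: both reads before both writes
      let vj := PySem.List.pyGetD acc p.2 0
      let vi := PySem.List.pyGetD acc p.1 0
      PySem.List.pySetD (PySem.List.pySetD acc p.1 vj) p.2 vi) a

-- ===== PRECONDITION & SPEC =====
def Spec_sortArrayByParityII1 (a : List Int) (out : List Int) : Prop := out = sortArrayByParityII1_alt a
instance (a : List Int) (out : List Int) : Decidable (Spec_sortArrayByParityII1 a out) := by unfold Spec_sortArrayByParityII1; infer_instance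

-- ===== CLAIM (what is proved, stated in full; the proofs are below) =====
def Claim_equal_sortArrayByParityII1 : Prop := ∀ (a : List Int), Dom_sortArrayByParityII1 a → Spec_sortArrayByParityII1 a (sortArrayByParityII1 a)

-- ===== LEMMAS AND PROOFS =====

-- the misplaced positions with residue r on the chain s, s+2, s+4, …
def pvWrongs (a : List Int) (s : Nat) (r : Int) : List Nat :=
  if h : s < a.length then
    (if a[s] % 2 = r then [s] else []) ++ pvWrongs a (s + 2) r
  else []
termination_by a.length - s

-- one pairwise swap (reads before writes, like Python's tuple assignment)
def pvSwapStep (acc : List Int) (p : Nat × Nat) : List Int :=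
  (acc.set p.1 (acc.getD p.2 0)).set p.2 (acc.getD p.1 0)

def pvSwapAll (a : List Int) (ps : List (Nat × Nat)) : List Int :=
  ps.foldl pvSwapStep a

theorem pvWrongs_nil (a : List Int) (s : Nat) (r : Int) (h : a.length ≤ s) :
    pvWrongs a s r = [] := by
  unfold pvWrongs; simp [Nat.not_lt.mpr h]

theorem pvWrongs_cons (a : List Int) (s : Nat) (r : Int) (h : s < a.length) :
    pvWrongs a s r = (if a[s] % 2 = r then [s] else []) ++ pvWrongs a (s + 2) r := by
  conv_lhs => rw [pvWrongs]
  rw [dif_pos h]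

-- updating a position below s or of the other parity leaves the chain's wrongs unchanged
theorem pvWrongs_set (a : List Int) (s t : Nat) (r v : Int)
    (h : t < s ∨ t % 2 ≠ s % 2) :
    pvWrongs (a.set t v) s r = pvWrongs a s r := by
  have hne : t ≠ s := by omega
  unfold pvWrongs
  simp only [List.length_set]
  split
  · next hs =>
    rw [List.getElem_set_ne (by omega), pvWrongs_set a (s + 2) t r v (by omega)]
  · rfl
termination_by a.length - s

theorem pvRange_two_nil (s b : Int) (h : b ≤ s) : PySem.List.pyRange s b 2 = [] := by
  rw [PySem.List.pyRange_of_pos _ _ (by omega)]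
  simp [Int.not_lt.mpr h]

theorem pvRange_two_cons (s b : Int) (h : s < b) :
    PySem.List.pyRange s b 2 = s :: PySem.List.pyRange (s + 2) b 2 := by
  rw [PySem.List.pyRange_of_pos _ _ (by omega : (0:Int) < 2),
      PySem.List.pyRange_of_pos _ _ (by omega : (0:Int) < 2)]
  by_cases h2 : s + 2 < b
  · rw [if_pos h, if_pos h2]
    have : ((b - s + 2 - 1) / 2).toNat = ((b - (s + 2) + 2 - 1) / 2).toNat + 1 := by omega
    rw [this, List.range_succ_eq_map]
    simp [List.map_map, Function.comp]
    intro k _; ring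
  · rw [if_pos h, if_neg h2]
    have : ((b - s + 2 - 1) / 2).toNat = 1 := by omega
    simp [this, List.range_succ]

-- A's loop equals swapping the k-th wrong even position with the k-th wrong odd position
theorem pvLoopA_eq (a : List Int) (i j : Nat) (hp : i % 2 ≠ j % 2) :
    pvLoopA a i j = pvSwapAll a ((pvWrongs a i 1).zip (pvWrongs a j 0)) := by
  rw [pvLoopA]
  split
  · next hij =>
    obtain ⟨hi, hj⟩ := hij
    have hgi : a.getD i 0 = a[i] := List.getD_eq_getElem a 0 hi
    have hgj : a.getD j 0 = a[j] := List.getD_eq_getElem a 0 hj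
    have hei := Int.emod_two_eq a[i]
    have hej := Int.emod_two_eq a[j]
    by_cases h0 : a[i] % 2 = 0
    · rw [if_pos (by rw [hgi, h0]; decide), pvLoopA_eq a (i + 2) j (by omega),
          pvWrongs_cons a i 1 hi]
      simp [h0]
    · by_cases h1 : a[j] % 2 = 1
      · rw [if_neg (by rw [hgi]; simp [h0]), if_pos (by rw [hgj, h1]; decide),
            pvLoopA_eq a i (j + 2) (by omega), pvWrongs_cons a j 0 hj]
        simp [h1]
      · have hi1 : a[i] % 2 = 1 := by omega
        have hj0 : a[j] % 2 = 0 := by omega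
        rw [if_neg (by rw [hgi]; simp [h0]), if_neg (by rw [hgj]; simp [h1]),
            pvLoopA_eq _ (i + 2) (j + 2) (by omega)]
        rw [pvWrongs_cons a i 1 hi, pvWrongs_cons a j 0 hj]
        simp only [hi1, hj0]
        have hwe : pvWrongs ((a.set i (a.getD j 0)).set j (a.getD i 0)) (i + 2) 1
            = pvWrongs a (i + 2) 1 := by
          rw [pvWrongs_set _ _ j _ _ (Or.inr (by omega)),
              pvWrongs_set _ _ i _ _ (Or.inl (by omega))]
        have hwo : pvWrongs ((a.set i (a.getD j 0)).set j (a.getD i 0)) (j + 2) 0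
            = pvWrongs a (j + 2) 0 := by
          rw [pvWrongs_set _ _ j _ _ (Or.inl (by omega)),
              pvWrongs_set _ _ i _ _ (Or.inr (by omega))]
        rw [hwe, hwo]
        rfl
  · next h =>
    rcases Nat.lt_or_ge i a.length with hi | hi
    · have hj : a.length ≤ j := by omega
      rw [pvWrongs_nil a j 0 hj]
      simp [pvSwapAll]
    · rw [pvWrongs_nil a i 1 hi]
      simp [pvSwapAll]
termination_by (a.length - i) + (a.length - j)
decreasing_by
  · omega
  · omega
  · simp only [List.length_set]; omega

-- B's index-list filters are the wrongs chains
theorem pvRangeFilter (a : List Int) (r : Int) (s : Nat) :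
    ((PySem.List.pyRange (s : Int) (a.length : Int) 2).filter
      (fun i => PySem.List.pyGetD a i 0 % 2 == r)) =
    (pvWrongs a s r).map (fun k : Nat => (k : Int)) := by
  by_cases hs : s < a.length
  · rw [pvRange_two_cons _ _ (by exact_mod_cast hs)]
    have hc : ((s : Int) + 2) = (((s + 2 : Nat)) : Int) := by push_cast; ring
    rw [List.filter_cons, hc, pvRangeFilter a r (s + 2), pvWrongs_cons a s r hs]
    have hget : PySem.List.pyGetD a (s : Int) 0 = a[s] := by
      simp [List.getD_eq_getElem?_getD, List.getElem?_eq_getElem hs]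
    by_cases hv : a[s] % 2 = r <;> simp [hget, hv]
  · rw [pvRange_two_nil _ _ (by exact_mod_cast Nat.not_lt.mp hs),
        pvWrongs_nil a s r (Nat.not_lt.mp hs)]
    rfl
termination_by a.length - s
decreasing_by omega

-- B's fold over the zipped Int index lists is pvSwapAll over the Nat pairs
theorem pvFoldlZip (E O : List Nat) (a : List Int) :
    ((E.map (fun k : Nat => (k : Int))).zip (O.map (fun k : Nat => (k : Int)))).foldl
      (fun acc p =>
        let vj := PySem.List.pyGetD acc p.2 0
        let vi := PySem.List.pyGetD acc p.1 0
        PySem.List.pySetD (PySem.List.pySetD acc p.1 vj) p.2 vi) a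
      = pvSwapAll a (E.zip O) := by
  induction E generalizing O a with
  | nil => simp [pvSwapAll]
  | cons i E ih =>
    cases O with
    | nil => simp [pvSwapAll]
    | cons j O =>
      simp only [List.map_cons, List.zip_cons_cons, List.foldl_cons]
      rw [ih]
      conv_rhs => rw [pvSwapAll, List.foldl_cons]
      rw [show (List.foldl pvSwapStep (pvSwapStep a (i, j)) (E.zip O)) = pvSwapAll (pvSwapStep a (i, j)) (E.zip O) from rfl]
      congr 1
      simp [pvSwapStep]

theorem pvAlt_eq (a : List Int) :
    sortArrayByParityII1_alt a = pvSwapAll a ((pvWrongs a 0 1).zip (pvWrongs a 1 0)) := by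
  unfold sortArrayByParityII1_alt
  have h0 := pvRangeFilter a 1 0
  have h1 := pvRangeFilter a 0 1
  simp only [Nat.cast_zero, Nat.cast_one] at h0 h1
  simp only [PySem.List.len_eq, h0, h1]
  exact pvFoldlZip _ _ a

-- ===== VERDICT (by name: the statement is the Claim_ definition above) =====
theorem sortArrayByParityII1_spec : Claim_equal_sortArrayByParityII1 := by
  intro a _
  unfold Spec_sortArrayByParityII1
  rw [pvAlt_eq]
  exact pvLoopA_eq a 0 1 (by decide)
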